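/- GENERATED by mk_final_copies.py from the proof of the farm's unit `start_decoder.F4d` (farm:start_decoder.F4d.1: Proof.lean) as the
   re-elaboration sweep compiled it — do not edit. -/
import Asan.CheckWalk
import Vorbis.Spec.Reader
import Vorbis.Spec.Units.start_decoder_F4d

open X86 X86.User Asan Vorbis Vorbis.Spec Vorbis.Spec.StartDecoder

set_option maxRecDepth 4000
set_option maxHeartbeats 4000000

namespace Vorbis.Spec.start_decoder_F4d

/-- `mov eax,1 ; shl eax,cl` with `cl = class_subclasses[j] ≤ 3`: the signed view of the result is `2 ^ sub`. -/
theorem f4d_shl (sub : Nat) (h : sub ≤ 3) :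
    (1#32 <<< ((BitVec.setWidth 8 (BitVec.zeroExtend 32 (BitVec.ofNat 8 sub))).toNat % 32)).toInt = ((2 ^ sub : Nat) : Int) := by
  have h4 : sub = 0 ∨ sub = 1 ∨ sub = 2 ∨ sub = 3 := by omega
  rcases h4 with rfl | rfl | rfl | rfl
  all_goals decide

/-- **Segment F4d of `start_decoder`** (`loop20` = 0x1154ee): the loop test of 3997 `1 << class_subclasses[j] <= k` (the byte is loaded
UNCHECKED: the fact `hld` names it before the walk; `f4d_shl`). Taken: class `j` is complete (`ClassOK.of_books`, `ClassesUpTo.step`),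
`add r12d,1 ; jmp loop19`, no store: `Floor.same_mem`. Not taken: `get_bits(f, 8)`, and `BookMid` at its return by `Floor.carry` with
the empty part `[1596, 1596)` of the element (`Floor.floor4_carry`, `Floor.classes_carry`, `F4.classCur_carry`). -/
theorem f4d_walk {Lay : Layout} (hLay : Lay.hi = 0x1000000) {μ : Microarch} (hμ : UserX.MicroOK μ) {u₀ : State}
    (hcode : HasCodeNat Lay u₀ Vorbis.L.start_decoder.entry Vorbis.Code.code_start_decoder.nat Vorbis.L.start_decoder.size)
    (hgb : ∀ (others : List Obj) (frames : List (Nat × FrameLayout)) (Blk : Block → Prop) (len : Nat),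
      Calls Lay μ Vorbis.WayInv (Vorbis.conv u₀) Vorbis.L.get_bits.entry (Vorbis.Spec.get_bits.spec others frames Blk len))
    {g : Ghost} {i : Nat} {A5 : Arena} {A : Arena × List Obj} {mc : Int} {j k : Nat} {v : State}
    (hat : AtBookHead u₀ g i A5 A mc j k v) :
    ReachVia Lay μ WayInv v (fun w => BookMid u₀ g i A5 A mc j k w ∨ AtClassHead u₀ g i A5 A mc (j + 1) w) := by
  have hloop := hat.in4.loop
  have hlt := hat.in4.cur.lt
  have hfr := hloop.frame
  have he := hfr.entry
  v_entry he
  simp only [depth] at he_room he_stack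
  have hgb' := hgb A.2 g.frames' (g.Blk A) g.len
  have hgeo := Floor.geo hloop hlt
  obtain ⟨r8, rlo, rhi, ra, flo, fhi, fstack, farena, flog, fc1, fc64, ilt, gdef, blo, bhi, btext, bstack, bdata, blog⟩ := hgeo
  have hmc2 := hat.in4.cur.mc_hi
  have hj := hat.j_le
  have hj31 : j < 2 ^ 31 := by omega
  have hk8 : k ≤ 8 := F4.book_k_le hat
  have hk31 : k < 2 ^ 31 := by omega
  obtain ⟨R, hR⟩ : ∃ R, R = g.R := ⟨_, rfl⟩
  obtain ⟨f, hfe⟩ : ∃ f, f = g.f := ⟨_, rfl⟩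
  obtain ⟨gi, hgi⟩ : ∃ gi, gi = floorAt g v.mem i := ⟨_, rfl⟩
  obtain ⟨sub, hsub⟩ : ∃ sub, sub = Floor1.class_subclasses v.mem (floorAt g v.mem i) j := ⟨_, rfl⟩
  have hsub3 : sub ≤ 3 := by
    rw [hsub]
    exact hat.cur.sub
  have w_rip := hfr.rip
  have c_rsp := hfr.rsp
  have c_rbp := hloop.rbp
  have c_rbx := hat.in4.rbx
  have c_r12 : v.reg .r12 = UInt64.ofNat j := hat.r12
  have c_r14 : v.reg .r14 = UInt64.ofNat k := hat.r14
  rw [← hR] at c_rsp r8 rlo rhi ra fstack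
  rw [← hfe] at c_rbp flo fhi fstack farena flog
  rw [← hgi] at c_rbx gdef hsub
  simp only [addr] at c_rsp c_rbp c_rbx
  have ea : (UInt64.ofNat gi + UInt64.ofNat j + 49 : Word).toNat = gi + 49 + j := by
    u_omega
  have hld : v.mem.readLE (UInt64.ofNat gi + UInt64.ofNat j + 49) 1 = sub := by
    rw [hsub]
    simp only [vacc, voff]
    unfold Mem.u8
    rw [← eq_addr _ _ ea]
  have w_eq : Mem.EqOn Vorbis.L.textLo Vorbis.L.textHi u₀.mem v.mem := hfr.code
  have hdf : v.flags .df = false := (show abiInv _ from hfr.inv).1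
  have hmx : v.mxcsr &&& 0x1F80 = 0x1F80 := (show abiInv _ from hfr.inv).2
  have hsse := Vorbis.sseOK_of_abiInv hfr.inv
  u_walk hcode [hμ.vendor, Vorbis.Spec.cnt32_sext j hj31, Vorbis.Spec.cnt32_succ j (by omega)] until [Vorbis.L.start_decoder.cut211, Vorbis.L.start_decoder.loop19] span [Vorbis.L.textLo, Vorbis.L.textHi] side (v_side)
  case call_inv => v_inv
  case pre_11550e =>
    have hun : ShadowUntouched v.mem s_11550e.mem := by v_untouched
    have hrdi : (s_11550e.reg .rdi).toNat = g.f := by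
      rw [w_rdi, hfe]
      exact toNat_addr g.f (by omega)
    refine ⟨Floor.reader_pre hloop ?_ hun hrdi ?_, ?_⟩
    · rw [w_rsp, ← hR]
      u_omega
    · rw [w_mem]
      refine Floor.bits_push hloop _ 8 _ ?_ ?_
      · rw [← hR]
        u_omega
      · u_omega
    · rw [bitsArg_def, w_rsi]
      decide
  · -- `jle` taken: `2 ^ sub ≤ k`, class `j` is complete; 0x1155be `add r12d,1 ; jmp loop19`
    rw [f4d_shl sub hsub3, Vorbis.Spec.cnt32_part_toInt k hk31] at hbr_115500
    have hinv : abiInv s_1155c2 := by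
      refine ⟨?_, ?_⟩
      · rw [w_flags]
        simp only [X86.User.df_setStatus]
        exact hdf
      · rw [w_mxcsr]
        exact hmx
    have hrsp : s_1155c2.reg .rsp = addr g.R := by
      rw [w_kept .rsp rfl]
      exact hfr.rsp
    have hrbp : s_1155c2.reg .rbp = addr g.f := by
      rw [w_kept .rbp rfl]
      exact hloop.rbp
    have hloop' := Floor.same_mem hloop w_mem w_rip hrsp hrbp hinv
    have hpow : 2 ^ Floor1.class_subclasses v.mem (floorAt g v.mem i) j ≤ k := by
      rw [← hgi, ← hsub]
      omega
    have hclass := ClassOK.of_books hat.cur.books hpow hat.cur.dim hat.cur.sub hat.cur.master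
    refine ReachVia.done (Or.inr ⟨⟨hloop', ?_, ?_, ?_⟩, ?_, ?_, ?_⟩)
    · rw [w_kept .rbx rfl, w_mem]
      exact hat.in4.rbx
    · rw [w_kept .r13 rfl]
      exact hat.in4.r13
    · rw [w_mem]
      exact hat.in4.cur
    · exact w_r12
    · omega
    · rw [w_mem]
      exact ClassesUpTo.step hat.classes hclass
  · -- the return of get_bits(f, 8): the cut point 0x115513
    rw [f4d_shl sub hsub3, Vorbis.Spec.cnt32_part_toInt k hk31] at hbr_115500
    have hrdi : (s_11550e.reg .rdi).toNat = f := by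
      rw [w_rdi_11550e]
      exact toNat_addr f (by omega)
    obtain ⟨hpu, hpb⟩ := w_post
    rw [hrdi] at hpb
    v_after_call w_rsp_11550e w_mem_11550e
    simp only [w_rdi_11550e] at w_same
    have hun0 : ShadowUntouched v.mem s_11550e.mem := by
      rw [w_mem_11550e]
      v_untouched
    have hun : ShadowUntouched v.mem s_11550er.mem := Mem.EqOn.trans hun0 hpu
    have hsame : Mem.SameExcept [⟨R - 408, R⟩, ⟨f + 48, f + 56⟩, ⟨f + 84, f + 96⟩, ⟨f + 136, f + 144⟩,
        ⟨f + 1484, f + 1749⟩, ⟨f + 1752, f + 1784⟩] v.mem s_11550er.mem := by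
      u_same
    rw [hR, hfe] at hsame
    have hws : ∀ w, w ∈ [(⟨g.R - 408, g.R⟩ : Span), ⟨g.f + 48, g.f + 56⟩, ⟨g.f + 84, g.f + 96⟩, ⟨g.f + 136, g.f + 144⟩,
        ⟨g.f + 1484, g.f + 1749⟩, ⟨g.f + 1752, g.f + 1784⟩] → Floor.Win g (floorAt g v.mem i) 1596 1596 w := by
      intro w hw
      simp only [List.mem_cons, List.mem_nil_iff, or_false] at hw
      unfold Floor.Win
      rcases hw with rfl | rfl | rfl | rfl | rfl | rfl
      all_goals simp only []
      all_goals omega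
    have earg : bitsArg s_11550e = 8 := by
      rw [bitsArg_def, w_rsi_11550e]
      rfl
    have e1 : s_11550er.reg .rsp = addr g.R := by
      rw [w_rsp, hR]
      rfl
    have e2 : s_11550er.reg .rbp = addr g.f := by
      rw [w_kept .rbp rfl, c_rbp, hfe]
      rfl
    have hbits' : Bits (g.Blk A) g.len s_11550er.mem g.f := by
      rw [← hfe]
      exact hpb.bits
    have hloop' := Floor.carry hloop hlt (Nat.le_refl _) w_rip e1 e2 w_inv w_eq hsame hws hun hbits'
    have hgeo := Floor.geo hloop hlt
    obtain ⟨eG, _, ecc, _⟩ := Floor.fields_same hgeo hsame hws (Nat.le_refl _)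
    have hcur' := Floor.floor4_carry hgeo hat.in4.cur (by omega) (Nat.le_refl _) (Nat.le_refl _) hsame hws
    have hcl' := Floor.classes_carry hgeo hat.classes (by omega) (by omega) (Nat.le_refl _) (Nat.le_refl _) hsame
      (fun w hw => (hws w hw).winT)
    have hcc' := F4.classCur_carry hgeo hat.cur (by omega) (by omega) (Nat.le_refl _) (Nat.le_refl _) hsame
      (fun w hw => (hws w hw).winT)
    refine ReachVia.done (Or.inl ⟨⟨hloop', ?_, ?_, hcur'⟩, ?_, ?_, hj, ?_, ?_, ?_, ?_⟩)
    · rw [eG, w_kept .rbx rfl]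
      exact hat.in4.rbx
    · rw [w_kept .r13 rfl]
      exact hat.in4.r13
    · rw [w_kept .r12 rfl]
      exact hat.r12
    · rw [w_kept .r14 rfl]
      exact hat.r14
    · rw [eG, ecc]
      exact hcl'
    · rw [eG, ecc]
      exact hcc'
    · rw [eG]
      have EG := Floor.elem_below hgeo hsame (fun w hw => (hws w hw).winT (i := i)) (Nat.le_refl _) (Nat.le_refl _)
      rw [← hgi] at EG ⊢
      have es : Floor1.class_subclasses s_11550er.mem gi j = Floor1.class_subclasses v.mem gi j := by
        simp only [vacc, voff]
        exact EG.u8 _ (by omega) (by omega) (by omega)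
      rw [es, ← hsub]
      omega
    · have h2 := hpb.result.2 (by rw [earg]; decide)
      rw [earg] at h2
      exact h2

end Vorbis.Spec.start_decoder_F4d

/-- The unit `start_decoder.F4d`: the statement is the claim `SegF4d`. -/
theorem Vorbis.Spec.Worked.start_decoder_F4d_ok : Vorbis.Spec.start_decoder_F4d.Statement := by
  intro Lay hLay μ hμ u₀ hcode hgb g i A5 A mc j k v hat
  exact Vorbis.Spec.start_decoder_F4d.f4d_walk hLay hμ hcode hgb hat
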